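-- pv_equiv track=rewrite | github.com/aabamar/portofolio-Basic_python | Distribute_user/Distribute_user.py | distribute_user
-- ===== SOURCE A (Python) =====
-- def distribute_user(n, k):
--     '''
--     Function to distribute n user equally to k class
--
--     Parameters
--     ----------
--     n : int
--         The number of people to distribute
--
--     k : int
--         The number of group
--
--     Returns
--     -------
--     group_size : list
--         The list of group size (must be integer) and shape of (k)
--     '''
--
--     group_size = [] #define group_size list variable
--     num = 0 #define while parameter
--
--     '''
--     fair_group variable containing the amount of people with fair amount between each group
--     e.g: if the total of people = 17 and the total of group = 3 then, the fair amount between each group is 5 with 2 remaining people is not included yet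
--
--     remaining_group variable containing the remaining amount of people after the amount of people with fair amount between each group has been distributed
--     '''
--
--     fair_group = n // k
--     remaining_group = n % k
--
--     while num < k: #code for distribute amount of people to each group with fair amount of people
--       group_size.append(fair_group)
--
--       num += 1
--
--     num = 0 #define while parameter
--
--     while num < remaining_group: #code for add remaining people to the group
--       group_size[num] += 1
--
--       num += 1
--
--     return group_size
-- ===== SOURCE B (Python) =====
-- def distribute_user(n, k):
--     # Per-group closed form: group i holds ceil((n - i)/k) people, computed
--     # as one floor division per group; no remainder bookkeeping at all.
--     return [(n + k - 1 - i) // k for i in range(k)]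
-- ===== Notes on version B (the rewrite author's own statement) =====
-- stated objective: alternative
-- what changed: Drops the fair-share/remainder decomposition entirely: instead of filling k slots with n//k and then walking a prefix adding the n%k leftovers, B computes each group's size independently by its own closed-form floor division (n+k-1-i)//k over range(k).
import Mathlib
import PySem

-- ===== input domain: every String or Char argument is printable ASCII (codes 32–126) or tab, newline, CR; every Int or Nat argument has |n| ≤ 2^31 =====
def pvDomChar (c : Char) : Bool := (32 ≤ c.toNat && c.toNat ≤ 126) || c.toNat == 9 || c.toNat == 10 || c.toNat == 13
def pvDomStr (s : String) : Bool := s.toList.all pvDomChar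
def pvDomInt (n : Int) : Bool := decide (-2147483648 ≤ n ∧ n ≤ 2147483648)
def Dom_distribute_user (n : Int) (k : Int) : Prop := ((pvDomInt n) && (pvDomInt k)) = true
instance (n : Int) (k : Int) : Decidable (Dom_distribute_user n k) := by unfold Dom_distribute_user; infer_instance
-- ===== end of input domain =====

-- ===== PORT A =====
-- B replaces the fair-share/remainder scheme by one closed-form floor division per group; objective: alternative.
-- first while-loop: append fair_group, k times
def pvA_loop1 (fair : Int) (k : Int) (num : Int) (gs : List Int) : List Int :=
  if num < k then pvA_loop1 fair k (num + 1) (gs ++ [fair]) else gs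
termination_by (k - num).toNat
decreasing_by omega

-- second while-loop: group_size[num] += 1 for num < remaining_group
def pvA_loop2 (rem : Int) (num : Int) (gs : List Int) : List Int :=
  if num < rem then pvA_loop2 rem (num + 1) (gs.modify num.toNat (· + 1)) else gs
termination_by (rem - num).toNat
decreasing_by omega

def distribute_user (n : Int) (k : Int) : List Int :=
  let fair_group := PySem.Int.floordiv n k
  let remaining_group := PySem.Int.mod n k
  let group_size := pvA_loop1 fair_group k 0 []
  pvA_loop2 remaining_group 0 group_size

-- ===== PORT B =====
def distribute_user_alt (n : Int) (k : Int) : List Int :=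
  (PySem.List.pyRange 0 k 1).map (fun i => PySem.Int.floordiv (n + k - 1 - i) k)

-- ===== PRECONDITION & SPEC =====
-- Pre_ excludes exactly k = 0, where Python's n // k raises ZeroDivisionError.
def Pre_distribute_user (n : Int) (k : Int) : Prop := k ≠ 0
instance (n : Int) (k : Int) : Decidable (Pre_distribute_user n k) := by unfold Pre_distribute_user; infer_instance
def pvWitness_distribute_user : Int × Int := (17, 3)
def Spec_distribute_user (n : Int) (k : Int) (out : List Int) : Prop := out = distribute_user_alt n k
instance (n : Int) (k : Int) (out : List Int) : Decidable (Spec_distribute_user n k out) := by unfold Spec_distribute_user; infer_instance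

-- ===== CLAIM (what is proved, stated in full; the proofs are below) =====
def Claim_equal_distribute_user : Prop := ∀ (n : Int) (k : Int), Dom_distribute_user n k → Pre_distribute_user n k → Spec_distribute_user n k (distribute_user n k)

-- ===== LEMMAS AND PROOFS =====

theorem pvA_loop1_eq (fair k num : Int) (gs : List Int) :
    pvA_loop1 fair k num gs = gs ++ List.replicate (k - num).toNat fair := by
  induction num, gs using pvA_loop1.induct fair k with
  | case1 num gs hlt ih =>
    rw [pvA_loop1, if_pos hlt, ih]
    have h1 : (k - num).toNat = (k - (num + 1)).toNat + 1 := by omega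
    simp [h1, List.replicate_succ]
  | case2 num gs hlt =>
    rw [pvA_loop1, if_neg hlt]
    have h1 : (k - num).toNat = 0 := by omega
    simp [h1]

theorem pv_modify_mid {α : Type} (l1 : List α) (a : α) (l2 : List α) (f : α → α) (m : Nat)
    (hm : m = l1.length) :
    (l1 ++ a :: l2).modify m f = l1 ++ f a :: l2 := by
  subst hm
  induction l1 with
  | nil => simp [List.modify]
  | cons x xs ih => simpa [List.modify] using ih

theorem pvA_loop2_eq (rem : Int) (num : Int) (fair : Int) (a b : Nat)
    (hnum : num = (a : Int)) (hrem : rem ≤ (a : Int) + (b : Int)) :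
    pvA_loop2 rem num (List.replicate a (fair + 1) ++ List.replicate b fair)
      = List.replicate (a + (rem - num).toNat) (fair + 1)
        ++ List.replicate (b - (rem - num).toNat) fair := by
  induction h : (rem - num).toNat generalizing num a b with
  | zero =>
    rw [pvA_loop2, if_neg (by omega)]
    simp
  | succ m ih =>
    rw [pvA_loop2, if_pos (by omega)]
    have hb : 0 < b := by omega
    obtain ⟨b', rfl⟩ : ∃ b', b = b' + 1 := ⟨b - 1, by omega⟩
    have hmod : (List.replicate a (fair + 1) ++ List.replicate (b' + 1) fair).modify num.toNat (· + 1)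
        = List.replicate (a + 1) (fair + 1) ++ List.replicate b' fair := by
      have hna : num.toNat = a := by omega
      rw [hna, List.replicate_succ (n := b'),
        pv_modify_mid _ _ _ _ a (by simp), List.replicate_succ' (n := a)]
      simp
    rw [hmod, ih (num + 1) (a + 1) b' (by omega) (by push_cast; omega) (by omega)]
    congr 1 <;> congr 1 <;> omega

-- A equals the two-block list, for k ≠ 0.
theorem pvA_eq (n k : Int) (hk : k ≠ 0) :
    distribute_user n k
      = List.replicate (PySem.Int.mod n k).toNat (PySem.Int.floordiv n k + 1)
        ++ List.replicate (k - PySem.Int.mod n k).toNat (PySem.Int.floordiv n k) := by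
  unfold distribute_user
  simp only []
  rw [pvA_loop1_eq, List.nil_append]
  rcases lt_or_gt_of_ne hk with hneg | hpos
  · obtain ⟨h1, h2⟩ := PySem.Int.mod_neg_bounds n hneg
    rw [pvA_loop2, if_neg (by omega)]
    have e1 : (k - 0).toNat = 0 := by omega
    have e2 : (PySem.Int.mod n k).toNat = 0 := by omega
    have e3 : (k - PySem.Int.mod n k).toNat = 0 := by omega
    simp [e2, e3]
    omega
  · have h1 := PySem.Int.mod_nonneg n hpos
    have h2 := PySem.Int.mod_lt n hpos
    have hcast := pvA_loop2_eq (PySem.Int.mod n k) 0 (PySem.Int.floordiv n k) 0 (k - 0).toNat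
      (by simp) (by push_cast; omega)
    simp only [List.replicate_zero, List.nil_append] at hcast
    rw [hcast]
    congr 1 <;> congr 1 <;> omega

-- generic: a range-map of an if-threshold function is two replicate blocks
theorem pv_map_range_ite (a b : Int) (r m : Nat) (f : Nat → Int)
    (hf : ∀ j, j < m → f j = if j < r then a else b) (hr : r ≤ m) :
    (List.range m).map f = List.replicate r a ++ List.replicate (m - r) b := by
  apply List.ext_getElem
  · simp; omega
  · intro j hj hj'
    simp only [List.getElem_map, List.getElem_range]
    have hjm : j < m := by simpa using hj
    rw [hf j hjm]
    rcases Nat.lt_or_ge j r with hlt | hge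
    · rw [if_pos hlt, List.getElem_append_left (by simpa using hlt), List.getElem_replicate]
    · rw [if_neg (by omega), List.getElem_append_right (by simpa using hge), List.getElem_replicate]

-- ===== VERDICT (by name: the statement is the Claim_ definition above) =====
theorem distribute_user_spec : Claim_equal_distribute_user := by
  intro n k _ hk
  unfold Spec_distribute_user distribute_user_alt
  rw [pvA_eq n k hk, PySem.List.pyRange_one]
  rcases lt_or_gt_of_ne hk with hneg | hpos
  · obtain ⟨h1, h2⟩ := PySem.Int.mod_neg_bounds n hneg
    have e0 : (k - 0).toNat = 0 := by omega
    have e2 : (PySem.Int.mod n k).toNat = 0 := by omega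
    have e3 : (k - PySem.Int.mod n k).toNat = 0 := by omega
    simp [e2, e3]
    omega
  · have h1 := PySem.Int.mod_nonneg n hpos
    have h2 := PySem.Int.mod_lt n hpos
    have hfm := PySem.Int.floordiv_mul_add_mod n k
    rw [List.map_map,
      pv_map_range_ite (PySem.Int.floordiv n k + 1) (PySem.Int.floordiv n k)
        (PySem.Int.mod n k).toNat (k - 0).toNat
        _
        (fun j hj => by
          simp only [Function.comp]
          rcases Nat.lt_or_ge j (PySem.Int.mod n k).toNat with hlt | hge
          · rw [if_pos hlt, (PySem.Int.floordiv_eq_iff_of_pos hpos).2]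
            constructor <;> nlinarith [Int.toNat_of_nonneg h1, (by exact_mod_cast hlt :
              (j : Int) < ((PySem.Int.mod n k).toNat : Int))]
          · rw [if_neg (by omega), (PySem.Int.floordiv_eq_iff_of_pos hpos).2]
            have hjk : (j : Int) < k := by omega
            have hge' : ((PySem.Int.mod n k).toNat : Int) ≤ (j : Int) := by exact_mod_cast hge
            rw [Int.toNat_of_nonneg h1] at hge'
            constructor <;> nlinarith)
        (by omega)]
    congr 1
    congr 1
    omega
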